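-- pv_equiv track=rewrite | github.com/sebtsh/Nash-equilibria-BO | core/utils.py | get_agent_dims_bounds
-- ===== SOURCE A (Python) =====
-- def get_agent_dims_bounds(agent_dims):
--     """
--      WARNING FOR FUTURE SELF: To get agent i's slice of a strategy profile, do s[start_dim : end_dim], i.e., the +1 is
--      included here. This was not the case for the mixed NE code.
--     :param agent_dims: list of N ints.
--     :return: returns a list of N tuples (start_dim, end_dim) for each agent.
--     """
--     current_start = 0
--     agent_dims_bounds = []
--     for interval in agent_dims:
--         next_start = current_start + interval
--         agent_dims_bounds.append((current_start, next_start))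
--         current_start = next_start
--     return agent_dims_bounds
-- ===== SOURCE B (Python) =====
-- def get_agent_dims_bounds(agent_dims):
--     # Divide and conquer: solve each half independently, then shift the right
--     # half's bounds by the total size of the left half.
--     def rec(dims):
--         if len(dims) <= 1:
--             return [(0, dims[0])] if dims else []
--         mid = len(dims) // 2
--         offset = sum(dims[:mid])
--         return rec(dims[:mid]) + [(a + offset, b + offset) for a, b in rec(dims[mid:])]
--     return rec(agent_dims)
-- ===== Notes on version B (the rewrite author's own statement) =====
-- stated objective: alternative
-- what changed: Replaces the sequential running-start accumulator loop by a divide-and-conquer recursion: each half of the list is solved independently and the right half's bounds are shifted by the left half's total dimension.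
import Mathlib
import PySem

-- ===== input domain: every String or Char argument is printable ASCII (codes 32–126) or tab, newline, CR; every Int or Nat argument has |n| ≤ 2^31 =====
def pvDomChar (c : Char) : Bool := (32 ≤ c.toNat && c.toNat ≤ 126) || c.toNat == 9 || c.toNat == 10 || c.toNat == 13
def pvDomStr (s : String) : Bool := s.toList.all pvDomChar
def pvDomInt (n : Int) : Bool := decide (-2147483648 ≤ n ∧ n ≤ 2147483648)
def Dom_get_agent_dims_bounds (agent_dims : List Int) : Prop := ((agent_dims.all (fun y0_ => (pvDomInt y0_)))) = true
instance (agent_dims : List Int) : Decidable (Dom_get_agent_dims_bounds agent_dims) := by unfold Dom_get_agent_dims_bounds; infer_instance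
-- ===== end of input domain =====

-- ===== PORT A =====
-- literal port of A: running start, list built by appending in one loop
def get_agent_dims_bounds (agent_dims : List Int) : List (Int × Int) :=
  (agent_dims.foldl
    (fun st interval =>
      let next_start := st.1 + interval
      (next_start, st.2 ++ [(st.1, next_start)]))
    (0, [])).2

-- ===== PORT B =====
-- port of B: divide and conquer — solve each half, shift the right half by the left half's total
def pvRec (dims : List Int) : List (Int × Int) :=
  if dims.length ≤ 1 then
    match dims with
    | [] => []
    | d :: _ => [(0, d)]
  else
    let mid := dims.length / 2
    let offset := (dims.take mid).sum
    pvRec (dims.take mid) ++ (pvRec (dims.drop mid)).map (fun p => (p.1 + offset, p.2 + offset))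
termination_by dims.length
decreasing_by
  · simp only [List.length_take]; omega
  · simp only [List.length_drop]; omega

def get_agent_dims_bounds_alt (agent_dims : List Int) : List (Int × Int) :=
  pvRec agent_dims

-- ===== PRECONDITION & SPEC =====
def Spec_get_agent_dims_bounds (agent_dims : List Int) (out : List (Int × Int)) : Prop := out = get_agent_dims_bounds_alt agent_dims
instance (agent_dims : List Int) (out : List (Int × Int)) : Decidable (Spec_get_agent_dims_bounds agent_dims out) := by unfold Spec_get_agent_dims_bounds; infer_instance

-- ===== CLAIM (what is proved, stated in full; the proofs are below) =====
def Claim_equal_get_agent_dims_bounds : Prop := ∀ (agent_dims : List Int), Dom_get_agent_dims_bounds agent_dims → Spec_get_agent_dims_bounds agent_dims (get_agent_dims_bounds agent_dims)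

-- ===== LEMMAS AND PROOFS =====

-- ===== VERDICT (by name: the statement is the Claim_ definition above) =====
-- closed form: the i-th bound is (prefix-sum i, prefix-sum (i+1))
def pvCf (dims : List Int) : List (Int × Int) :=
  (List.range dims.length).map (fun i => ((dims.take i).sum, (dims.take (i + 1)).sum))

-- loop invariant: A's fold from state (s, acc) appends the closed form shifted by s
theorem pv_loop (dims : List Int) : ∀ (s : Int) (acc : List (Int × Int)),
    (dims.foldl (fun st interval =>
      let next_start := st.1 + interval
      (next_start, st.2 ++ [(st.1, next_start)])) (s, acc)).2
      = acc ++ (List.range dims.length).map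
          (fun i => (s + (dims.take i).sum, s + (dims.take (i + 1)).sum)) := by
  induction dims with
  | nil => intro s acc; simp
  | cons d ds ih =>
      intro s acc
      simp only [List.foldl, ih, List.length_cons, List.range_succ_eq_map, List.map_cons,
        List.map_map, List.take_succ_cons, List.sum_cons, List.take_zero, List.sum_nil]
      simp [Function.comp, List.append_assoc]
      intro a _
      constructor <;> ring

-- the closed form splits at any cut point: right part shifted by the left part's sum
theorem pvCf_append (l r : List Int) :
    pvCf (l ++ r) = pvCf l ++ (pvCf r).map (fun p => (p.1 + l.sum, p.2 + l.sum)) := by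
  simp only [pvCf, List.length_append, List.range_add, List.map_append, List.map_map]
  congr 1
  · apply List.map_congr_left
    intro i hi
    simp only [List.mem_range] at hi
    rw [List.take_append_of_le_length (by omega), List.take_append_of_le_length (by omega)]
  · apply List.map_congr_left
    intro i _
    have h1 : List.take (l.length + i) (l ++ r) = l ++ List.take i r := by
      rw [List.take_append]
      congr 1
      · exact List.take_of_length_le (by omega)
      · congr 1; omega
    have h2 : List.take (l.length + i + 1) (l ++ r) = l ++ List.take (i + 1) r := by
      rw [List.take_append]
      congr 1
      · exact List.take_of_length_le (by omega)
      · congr 1; omega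
    simp only [Function.comp, h1, h2, List.sum_append, Prod.mk.injEq]
    constructor <;> ring

theorem pvRec_eq_cf (dims : List Int) : pvRec dims = pvCf dims := by
  fun_induction pvRec dims with
  | case1 h => simp [pvCf]
  | case2 d rest h =>
      have hr : rest = [] := by cases rest with | nil => rfl | cons a t => simp at h
      subst hr
      simp [pvCf, List.range_succ]
  | case3 dims h mid offset ih1 ih2 =>
      rw [ih1, ih2]
      have := pvCf_append (dims.take (dims.length / 2)) (dims.drop (dims.length / 2))
      simp only [List.take_append_drop] at this
      rw [this]

theorem get_agent_dims_bounds_spec : Claim_equal_get_agent_dims_bounds := by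
  intro dims _
  show get_agent_dims_bounds dims = get_agent_dims_bounds_alt dims
  rw [get_agent_dims_bounds_alt, pvRec_eq_cf]
  simpa [get_agent_dims_bounds, pvCf] using pv_loop dims 0 []
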